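-- pv_equiv track=rewrite | github.com/m9h/hgx | hgx/_data.py | _neuron_group
-- ===== SOURCE A (Python) =====
-- _SENSORY_PREFIXES = (
--     "ADF",
--     "ADL",
--     "AFD",
--     "ALM",
--     "ALN",
--     "AQR",
--     "ASE",
--     "ASG",
--     "ASH",
--     "ASI",
--     "ASJ",
--     "ASK",
--     "AVM",
--     "AWA",
--     "AWB",
--     "AWC",
--     "BAG",
--     "CEP",
--     "FLP",
--     "IL1",
--     "IL2",
--     "OLL",
--     "OLQ",
--     "PDE",
--     "PHA",
--     "PHB",
--     "PHC",
--     "PLM",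
--     "PLN",
--     "PQR",
--     "PVM",
--     "URB",
--     "URX",
--     "URY",
-- )
--
-- _MOTOR_PREFIXES = (
--     "DA",
--     "DB",
--     "DD",
--     "VA",
--     "VB",
--     "VC",
--     "VD",
--     "AS",
--     "RMD",
--     "RME",
--     "RMF",
--     "RMG",
--     "RMH",
--     "SAA",
--     "SAB",
--     "SIA",
--     "SIB",
--     "SMB",
--     "SMD",
--     "URA",
-- )
--
-- def _neuron_group(name: str) -> str:
--     """Classify a neuron name into ``"sensory"``, ``"motor"``, or ``"inter"``."""
--     for pfx in _SENSORY_PREFIXES: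
--         if name.startswith(pfx):
--             return "sensory"
--     for pfx in _MOTOR_PREFIXES:
--         if name.startswith(pfx):
--             return "motor"
--     return "inter"
-- ===== SOURCE B (Python) =====
-- _GROUP_BY_PREFIX = {
--     **dict.fromkeys(
--         ("ADF", "ADL", "AFD", "ALM", "ALN", "AQR", "ASE", "ASG", "ASH", "ASI",
--          "ASJ", "ASK", "AVM", "AWA", "AWB", "AWC", "BAG", "CEP", "FLP", "IL1",
--          "IL2", "OLL", "OLQ", "PDE", "PHA", "PHB", "PHC", "PLM", "PLN", "PQR",
--          "PVM", "URB", "URX", "URY"),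
--         "sensory"),
--     **dict.fromkeys(
--         ("DA", "DB", "DD", "VA", "VB", "VC", "VD", "AS",
--          "RMD", "RME", "RMF", "RMG", "RMH", "SAA", "SAB", "SIA", "SIB", "SMB",
--          "SMD", "URA"),
--         "motor"),
-- }
--
--
-- def _neuron_group(name: str) -> str:
--     """Classify a neuron name into ``"sensory"``, ``"motor"``, or ``"inter"``."""
--     # Longest matching prefix wins: prefixes are 2-3 chars long, and the only
--     # length-2/length-3 overlaps (e.g. "AS" vs "ASE") resolve exactly as the
--     # sensory-before-motor table order does.
--     group = "inter"
--     for end in range(2, 4):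
--         group = _GROUP_BY_PREFIX.get(name[:end], group)
--     return group
-- ===== Notes on version B (the rewrite author's own statement) =====
-- stated objective: alternative
-- what changed: Replaced A's two prioritized startswith scans over separate sensory/motor tuples with a single prefix->group dictionary and a longest-match loop over prefix lengths 2..3 with a last-match-wins accumulator; the sensory-before-motor priority is not branched on at all, it falls out of the longest-match rule.
import Mathlib
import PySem

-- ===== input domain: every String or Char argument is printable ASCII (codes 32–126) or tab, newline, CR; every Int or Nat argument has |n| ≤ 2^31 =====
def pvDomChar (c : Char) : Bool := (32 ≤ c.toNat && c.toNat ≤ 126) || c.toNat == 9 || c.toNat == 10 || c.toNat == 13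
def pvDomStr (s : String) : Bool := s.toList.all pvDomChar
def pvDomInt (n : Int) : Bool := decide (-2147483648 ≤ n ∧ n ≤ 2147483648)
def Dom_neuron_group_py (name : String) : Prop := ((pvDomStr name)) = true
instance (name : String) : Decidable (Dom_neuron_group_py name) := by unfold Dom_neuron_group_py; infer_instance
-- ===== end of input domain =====

-- B replaces A's two prioritized startswith scans by one merged prefix->group dictionary
-- queried longest-match-last over prefix lengths 2..3 (objective: alternative; same speed class).

-- ===== PORT A =====
def pvSensoryPrefixes : List String :=
  ["ADF", "ADL", "AFD", "ALM", "ALN", "AQR", "ASE", "ASG", "ASH", "ASI",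
   "ASJ", "ASK", "AVM", "AWA", "AWB", "AWC", "BAG", "CEP", "FLP", "IL1",
   "IL2", "OLL", "OLQ", "PDE", "PHA", "PHB", "PHC", "PLM", "PLN", "PQR",
   "PVM", "URB", "URX", "URY"]

def pvMotorPrefixes : List String :=
  ["DA", "DB", "DD", "VA", "VB", "VC", "VD", "AS",
   "RMD", "RME", "RMF", "RMG", "RMH", "SAA", "SAB", "SIA", "SIB", "SMB", "SMD", "URA"]

-- the for-loop with early return over a prefix tuple
def pvAnyStartswith (name : String) : List String → Bool
  | [] => false
  | p :: ps => if PySem.Str.startswith name p then true else pvAnyStartswith name ps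

def neuron_group_py (name : String) : String :=
  if pvAnyStartswith name pvSensoryPrefixes then "sensory"
  else if pvAnyStartswith name pvMotorPrefixes then "motor"
  else "inter"

-- ===== PORT B =====
-- B's merged table: the dict.fromkeys(sensory, "sensory") entries followed by the
-- dict.fromkeys(motor, "motor") entries (keys are all distinct, so the {**..., **...}
-- merge is exactly this ofList); string keys become List Char keys.
def pvSensoryPaths : List (List Char) :=
  [['A','D','F'], ['A','D','L'], ['A','F','D'], ['A','L','M'], ['A','L','N'],
   ['A','Q','R'], ['A','S','E'], ['A','S','G'], ['A','S','H'], ['A','S','I'],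
   ['A','S','J'], ['A','S','K'], ['A','V','M'], ['A','W','A'], ['A','W','B'],
   ['A','W','C'], ['B','A','G'], ['C','E','P'], ['F','L','P'], ['I','L','1'],
   ['I','L','2'], ['O','L','L'], ['O','L','Q'], ['P','D','E'], ['P','H','A'],
   ['P','H','B'], ['P','H','C'], ['P','L','M'], ['P','L','N'], ['P','Q','R'],
   ['P','V','M'], ['U','R','B'], ['U','R','X'], ['U','R','Y']]

def pvMotorPaths : List (List Char) :=
  [['D','A'], ['D','B'], ['D','D'], ['V','A'], ['V','B'], ['V','C'], ['V','D'], ['A','S'],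
   ['R','M','D'], ['R','M','E'], ['R','M','F'], ['R','M','G'], ['R','M','H'],
   ['S','A','A'], ['S','A','B'], ['S','I','A'], ['S','I','B'], ['S','M','B'],
   ['S','M','D'], ['U','R','A']]

def pvGroupByPrefix : PySem.Dict (List Char) String :=
  PySem.Dict.ofList (pvSensoryPaths.map (fun p => (p, "sensory"))
                     ++ pvMotorPaths.map (fun p => (p, "motor")))

-- for end in range(2, 4): group = _GROUP_BY_PREFIX.get(name[:end], group)
def neuron_group_py_alt (name : String) : String :=
  (PySem.List.pyRange 2 4 1).foldl
    (fun group e =>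
      PySem.Dict.getD pvGroupByPrefix (PySem.List.slice name.toList none (some e)) group)
    "inter"

-- ===== PRECONDITION & SPEC =====
def Spec_neuron_group_py (name : String) (out : String) : Prop := out = neuron_group_py_alt name
instance (name : String) (out : String) : Decidable (Spec_neuron_group_py name out) := by unfold Spec_neuron_group_py; infer_instance

-- ===== CLAIM (what is proved, stated in full; the proofs are below) =====
def Claim_equal_neuron_group_py : Prop := ∀ (name : String), Dom_neuron_group_py name → Spec_neuron_group_py name (neuron_group_py name)

-- ===== LEMMAS AND PROOFS =====

-- startswith p ⟺ the first p.length characters equal p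
theorem pv_startswith_eq_take (s p : List Char) :
    PySem.Chars.startswith s p = (s.take p.length == p) := by
  rcases h : PySem.Chars.startswith s p with _ | _
  · symm; rw [beq_eq_false_iff_ne]
    intro he
    have : p <+: s := he ▸ List.take_prefix _ _
    rw [← PySem.Chars.startswith_iff] at this
    simp [this] at h
  · rw [PySem.Chars.startswith_iff] at h
    symm; rw [beq_iff_eq]
    exact (List.prefix_iff_eq_take.mp h).symm

-- the early-return loop over prefixes of a common length n is a membership test of name[:n]
theorem pv_any_eq_contains (name : String) (n : Nat) :
    ∀ (ps : List String), (∀ p ∈ ps, p.toList.length = n) →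
      pvAnyStartswith name ps = (ps.map String.toList).contains (name.toList.take n)
  | [], _ => rfl
  | p :: ps, h => by
    have hp : p.toList.length = n := h p (by simp)
    have ih := pv_any_eq_contains name n ps (fun q hq => h q (by simp [hq]))
    simp only [pvAnyStartswith, PySem.Str.startswith_eq, pv_startswith_eq_take, hp,
      List.map_cons, List.contains_cons, ih]
    cases hb : (name.toList.take n == p.toList) <;> simp

theorem pv_any_append (name : String) (l1 l2 : List String) :
    pvAnyStartswith name (l1 ++ l2) = (pvAnyStartswith name l1 || pvAnyStartswith name l2) := by
  induction l1 with
  | nil => rfl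
  | cons p ps ih =>
    simp only [List.cons_append, pvAnyStartswith, ih]
    cases PySem.Str.startswith name p <;> simp

def pvMotor2Paths : List (List Char) := pvMotorPaths.take 8
def pvMotor3Paths : List (List Char) := pvMotorPaths.drop 8

-- lookup in an assoc-list dict splits along ++ like Option.or
theorem pv_get?_mk_append (ps qs : List (List Char × String)) (k : List Char) :
    (PySem.Dict.mk (ps ++ qs)).get? k
      = ((PySem.Dict.mk ps).get? k).or ((PySem.Dict.mk qs).get? k) := by
  induction ps with
  | nil => simp [PySem.Dict.get?]
  | cons e ps ih =>
    obtain ⟨a, b⟩ := e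
    simp only [List.cons_append, PySem.Dict.get?_mk_cons, ih]
    by_cases h : a = k <;> simp [h]

-- lookup in a constant-valued table is a membership test
theorem pv_get?_tag (M : List (List Char)) (v : String) (k : List Char) :
    (PySem.Dict.mk (M.map (fun p => (p, v)))).get? k = if k ∈ M then some v else none := by
  induction M with
  | nil => simp [PySem.Dict.get?]
  | cons m M ih =>
    simp only [List.map_cons, PySem.Dict.get?_mk_cons, ih]
    by_cases h : m = k
    · simp [h]
    · have h' : k ≠ m := Ne.symm h
      simp [h, h']

set_option maxRecDepth 8000 in
theorem pv_table_eq :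
    pvGroupByPrefix
      = PySem.Dict.mk (pvSensoryPaths.map (fun p => (p, "sensory"))
                       ++ pvMotorPaths.map (fun p => (p, "motor"))) := by rfl

-- B's merged table, looked up: sensory membership first, then motor, then the default
theorem pv_getD_table (k : List Char) (g : String) :
    PySem.Dict.getD pvGroupByPrefix k g
      = if k ∈ pvSensoryPaths then "sensory"
        else if k ∈ pvMotor2Paths ∨ k ∈ pvMotor3Paths then "motor" else g := by
  have hsplit : (k ∈ pvMotorPaths) ↔ (k ∈ pvMotor2Paths ∨ k ∈ pvMotor3Paths) := by
    rw [show pvMotorPaths = pvMotor2Paths ++ pvMotor3Paths from rfl, List.mem_append]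
  rw [pv_table_eq]
  simp only [PySem.Dict.getD, pv_get?_mk_append, pv_get?_tag]
  by_cases h : k ∈ pvSensoryPaths
  · simp [h]
  · by_cases hm : k ∈ pvMotorPaths <;> simp [h, hm, ← hsplit]

theorem pv_sensory_len : ∀ p ∈ pvSensoryPaths, p.length = 3 := by decide
theorem pv_motor2_len : ∀ p ∈ pvMotor2Paths, p.length = 2 := by decide
theorem pv_motor3_len : ∀ p ∈ pvMotor3Paths, p.length = 3 := by decide

-- ===== VERDICT (by name: the statement is the Claim_ definition above) =====
theorem neuron_group_py_spec : Claim_equal_neuron_group_py := by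
  intro name _
  unfold Spec_neuron_group_py neuron_group_py neuron_group_py_alt
  rw [show PySem.List.pyRange 2 4 1 = [2, 3] from by decide]
  simp only [List.foldl_cons, List.foldl_nil]
  rw [PySem.List.slice_to (xs := name.toList) (b := 2) (by decide),
      PySem.List.slice_to (xs := name.toList) (b := 3) (by decide),
      pv_getD_table, pv_getD_table,
      pv_any_eq_contains name 3 pvSensoryPrefixes (by decide),
      show pvMotorPrefixes
          = ["DA", "DB", "DD", "VA", "VB", "VC", "VD", "AS"]
            ++ ["RMD", "RME", "RMF", "RMG", "RMH", "SAA", "SAB", "SIA", "SIB", "SMB", "SMD", "URA"]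
        from rfl,
      pv_any_append,
      pv_any_eq_contains name 2 _ (by decide),
      pv_any_eq_contains name 3 _ (by decide),
      show (pvSensoryPrefixes.map String.toList) = pvSensoryPaths from rfl,
      show ((["DA", "DB", "DD", "VA", "VB", "VC", "VD", "AS"] : List String).map String.toList)
          = pvMotor2Paths from rfl,
      show ((["RMD", "RME", "RMF", "RMG", "RMH", "SAA", "SAB", "SIA", "SIB", "SMB", "SMD",
              "URA"] : List String).map String.toList) = pvMotor3Paths from rfl,
      show ((2 : Int).toNat) = 2 from rfl, show ((3 : Int).toNat) = 3 from rfl]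
  generalize hl : name.toList = l
  have h3 : l.take 2 = (l.take 3).take 2 := by simp [List.take_take]
  have hnS2 : l.take 2 ∉ pvSensoryPaths := fun h => by
    have := pv_sensory_len _ h
    have := List.length_take_le 2 l
    omega
  have hnM32 : l.take 2 ∉ pvMotor3Paths := fun h => by
    have := pv_motor3_len _ h
    have := List.length_take_le 2 l
    omega
  by_cases hS : l.take 3 ∈ pvSensoryPaths
  · simp [hS]
  · by_cases hM3 : l.take 3 ∈ pvMotor3Paths
    · simp [hS, hM3]
    · by_cases hM2 : l.take 3 ∈ pvMotor2Paths
      · -- then the name itself has length 2, so name[:2] = name[:3]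
        have hlen3 : (l.take 3).length = 2 := pv_motor2_len _ hM2
        have hle : l.length ≤ 2 := by
          rw [List.length_take] at hlen3; omega
        have he : l.take 2 = l.take 3 := by
          rw [List.take_of_length_le hle, List.take_of_length_le (by omega)]
        rw [he]
        simp [hS, hM2, hM3]
      · -- name[:3] misses the table entirely; only the name[:2] motor-2 lookup matters
        by_cases h2 : l.take 2 ∈ pvMotor2Paths <;>
          simp [hS, hM2, hM3, hnS2, hnM32, h2]
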